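-- pv_equiv track=rewrite | github.com/AdamOtto/Daily-Challenges | Challenge1248.py | Solution
-- ===== SOURCE A (Python) =====
-- def Solution(s, words):
--     wl = len(words)
--     if wl == 0:
--         return []
--     wwl = len(words[0])
--     sl = len(s)
--     retVal = []
--
--     for i in range(0, sl - (wl * wwl) + 1):
--         addVal = True
--         ss = s[i:i+(wl * wwl)]
--         for j in words:
--             if not ss.__contains__(j):
--                 addVal = False
--                 break
--         if addVal:
--             retVal.append(i)
--     return retVal
-- ===== SOURCE B (Python) =====
-- def Solution(s, words):
--     # Different algorithm: for each word, one forward pass over the window starts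
--     # computes "first occurrence of the word at or after i" (a cached s.find that
--     # only re-searches when the cached occurrence falls behind i), so each window
--     # is tested in O(1) per word instead of substring-searching the window text.
--     # A word that never occurs in s occurs in no window, so the answer is [].
--     if len(words) == 0:
--         return []
--     L = len(words) * len(words[0])
--     sl = len(s)
--     N = sl - L + 1
--     if N <= 0:
--         return []
--     INF = sl + L + 1
--     data = []
--     for w in words:
--         cur = s.find(w)
--         if cur == -1:
--             return []
--         nxt = []
--         for i in range(N):
--             if cur != -1 and cur < i:
--                 cur = s.find(w, i)
--             nxt.append(cur if cur != -1 else INF)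
--         data.append((len(w), nxt))
--     return [i for i in range(N)
--             if all(nxt[i] + lw <= i + L for (lw, nxt) in data)]
-- ===== Notes on version B (the rewrite author's own statement) =====
-- stated objective: alternative
-- what changed: Instead of substring-searching every word inside every window slice, B makes one forward pass per word over the window starts maintaining a cached first-occurrence position via s.find (re-searching only when the cache falls behind), answers each window in O(1) per word, and returns [] as soon as some word does not occur in s at all.
import Mathlib
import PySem

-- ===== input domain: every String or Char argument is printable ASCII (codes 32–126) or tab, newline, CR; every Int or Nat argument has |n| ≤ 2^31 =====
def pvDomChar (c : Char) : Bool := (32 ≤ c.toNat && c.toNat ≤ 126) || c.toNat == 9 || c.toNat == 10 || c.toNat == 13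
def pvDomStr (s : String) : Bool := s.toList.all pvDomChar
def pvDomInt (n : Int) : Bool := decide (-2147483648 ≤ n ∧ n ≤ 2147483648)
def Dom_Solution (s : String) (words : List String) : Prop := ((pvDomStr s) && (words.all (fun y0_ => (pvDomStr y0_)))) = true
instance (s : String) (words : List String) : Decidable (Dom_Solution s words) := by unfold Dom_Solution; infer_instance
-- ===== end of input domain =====

-- B replaces the per-window substring searches by, per word, one forward pass over the window
-- starts with a cached first-occurrence position (recomputed via find only when it falls behind),
-- plus an early [] when some word does not occur in s at all; an alternative exact algorithm.

-- ===== PORT A =====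
def Solution (s : String) (words : List String) : List Int :=
  let wl : Int := (words.length : Int)
  if wl == 0 then []
  else
    -- words[0]: guarded by wl ≠ 0, so pyGet? is in range and getD "" never fires
    let wwl : Int := PySem.Str.len ((PySem.List.pyGet? words 0).getD "")
    let sl : Int := PySem.Str.len s
    (PySem.List.pyRange 0 (sl - wl * wwl + 1) 1).foldl
      (fun retVal i =>
        let ss := PySem.Str.slice s (some i) (some (i + wl * wwl))
        if words.all (fun j => PySem.Str.isIn j ss) then retVal ++ [i] else retVal)
      []

-- ===== PORT B =====
-- Source B's inner `for i in range(N)` loop for one word: `cur` is the cached result of s.find;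
-- it is re-searched from i exactly when it fell behind i; the entry for i is cur (or INF = inf).
def lazyNxtGo (s w : String) (inf : Nat) : Nat → Nat → Int → List Nat
  | 0, _i, _cur => []
  | n + 1, i, cur =>
    let cur' := if cur ≠ -1 ∧ cur < (i : Int) then PySem.Str.findFrom s w (i : Int) none else cur
    (if cur' ≠ -1 then cur'.toNat else inf) :: lazyNxtGo s w inf n (i + 1) cur'

-- Source B's `for w in words` loop building `data`; `none` = the early `return []` on an absent word.
def buildData (s : String) (inf N : Nat) : List String → Option (List (Nat × List Nat))
  | [] => some []
  | w :: rest =>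
    let cur := PySem.Str.find s w
    if cur == -1 then none
    else
      match buildData s inf N rest with
      | none => none
      | some ds => some ((w.toList.length, lazyNxtGo s w inf N 0 cur) :: ds)

def Solution_alt (s : String) (words : List String) : List Int :=
  if words.length == 0 then []
  else
    let L := words.length * (words.headD "").toList.length
    let sl := s.toList.length
    if sl + 1 ≤ L then []  -- N ≤ 0
    else
      let N := sl + 1 - L
      match buildData s (sl + L + 1) N words with
      | none => []
      | some data =>
        ((List.range N).filter
          (fun i => data.all (fun d => decide (d.2.getD i 0 + d.1 ≤ i + L)))).map
          (fun i => Int.ofNat i)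

-- ===== PRECONDITION & SPEC =====
def Spec_Solution (s : String) (words : List String) (out : List Int) : Prop := out = Solution_alt s words
instance (s : String) (words : List String) (out : List Int) : Decidable (Spec_Solution s words out) := by unfold Spec_Solution; infer_instance

-- ===== CLAIM (what is proved, stated in full; the proofs are below) =====
def Claim_equal_Solution : Prop := ∀ (s : String) (words : List String), Dom_Solution s words → Spec_Solution s words (Solution s words)

-- ===== LEMMAS AND PROOFS =====

-- invariant carried by the cached find position `cur` of lazyNxtGo at window start i
def CurInv (s w : String) (i : Nat) (cur : Int) : Prop :=
  (cur = -1 → ∀ q, i ≤ q → ¬ w.toList <+: s.toList.drop q) ∧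
  (cur ≠ -1 → 0 ≤ cur ∧ w.toList <+: s.toList.drop cur.toNat ∧
    ∀ q, i ≤ q → q < cur.toNat → ¬ w.toList <+: s.toList.drop q)

theorem infix_iff_prefix_drop (t v : List Char) : t <:+: v ↔ ∃ j, t <+: v.drop j := by
  constructor
  · rintro ⟨s1, s2, rfl⟩
    exact ⟨s1.length, by simp⟩
  · rintro ⟨j, h⟩
    exact h.isInfix.trans (List.drop_suffix j v).isInfix

theorem curInv_step (s w : String) (i : Nat) (cur : Int) (h : CurInv s w i cur) :
    CurInv s w (i + 1) cur := by
  obtain ⟨h1, h2⟩ := h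
  constructor
  · intro hc q hq
    exact h1 hc q (by omega)
  · intro hc
    obtain ⟨ha, hb, hd⟩ := h2 hc
    exact ⟨ha, hb, fun q hq hlt => hd q (by omega) hlt⟩

theorem curInv_findFrom (s w : String) (i : Nat) (hi : i ≤ s.toList.length) :
    CurInv s w i (PySem.Str.findFrom s w (i : Int) none) := by
  rw [PySem.Str.findFrom_eq]
  constructor
  · intro hc q hq
    rw [PySem.Chars.findFrom_natCast_eq_neg_one_iff s.toList w.toList i hi] at hc
    intro hpre
    exact hc ((infix_iff_prefix_drop _ _).mpr ⟨q - i, by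
      rw [List.drop_drop]
      have : i + (q - i) = q := by omega
      rwa [this]⟩)
  · intro hc
    obtain ⟨ha, hb, hd⟩ := PySem.Chars.findFrom_natCast_spec s.toList w.toList i hi hc
    exact ⟨by omega, hb, fun q hq hlt => hd q hq hlt⟩

theorem lazyNxt_getD (s w : String) (L : Nat) :
    ∀ (n i k : Nat) (cur : Int), k < n → i + n ≤ s.toList.length + 1 → CurInv s w i cur →
    (((lazyNxtGo s w (s.toList.length + L + 1) n i cur).getD k 0 + w.toList.length ≤ (i + k) + L)
      ↔ ∃ q, i + k ≤ q ∧ q + w.toList.length ≤ (i + k) + L ∧ w.toList <+: s.toList.drop q) := by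
  intro n
  induction n with
  | zero => intro i k cur hk; omega
  | succ m ih =>
    intro i k cur hk hn hinv
    simp only [lazyNxtGo]
    set cur' := if cur ≠ -1 ∧ cur < (i : Int) then PySem.Str.findFrom s w (i : Int) none else cur
      with hcur'
    have hi : i ≤ s.toList.length := by omega
    have hinv' : CurInv s w i cur' := by
      rw [hcur']
      split_ifs with hcond
      · exact curInv_findFrom s w i hi
      · exact hinv
    have hge : cur' ≠ -1 → (i : Int) ≤ cur' := by
      intro hne
      rw [hcur'] at hne ⊢
      split_ifs at hne ⊢ with hcond
      · rw [PySem.Str.findFrom_eq] at hne ⊢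
        exact (PySem.Chars.findFrom_natCast_spec s.toList w.toList i hi hne).1
      · push Not at hcond
        rcases eq_or_ne cur (-1) with h | h
        · exact absurd h hne
        · exact hcond h
    cases k with
    | zero =>
      simp only [List.getD_cons_zero]
      by_cases hne : cur' = -1
      · rw [if_neg (by simp [hne])]
        constructor
        · intro h; omega
        · rintro ⟨q, hq1, hq2, hpre⟩
          exact absurd hpre (hinv'.1 hne q (by omega))
      · rw [if_pos hne]
        have hnn : (0 : Int) ≤ cur' := (hinv'.2 hne).1
        have hgei : i ≤ cur'.toNat := by
          have := hge hne; omega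
        constructor
        · intro h
          exact ⟨cur'.toNat, by omega, by omega, (hinv'.2 hne).2.1⟩
        · rintro ⟨q, hq1, hq2, hpre⟩
          have hle : cur'.toNat ≤ q := by
            by_contra hlt
            exact (hinv'.2 hne).2.2 q (by omega) (by omega) hpre
          omega
    | succ k' =>
      simp only [List.getD_cons_succ]
      have := ih (i + 1) k' cur' (by omega) (by omega) (curInv_step s w i cur' hinv')
      constructor
      · intro h
        obtain ⟨q, hq1, hq2, hpre⟩ := this.mp (by omega)
        exact ⟨q, by omega, by omega, hpre⟩
      · rintro ⟨q, hq1, hq2, hpre⟩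
        have := this.mpr ⟨q, by omega, by omega, hpre⟩
        omega

theorem infix_take_drop (t u : List Char) (i L : Nat) :
    t <:+: (u.drop i).take L ↔ ∃ q, i ≤ q ∧ q + t.length ≤ i + L ∧ t <+: u.drop q := by
  rw [infix_iff_prefix_drop]
  constructor
  · rintro ⟨j, hj⟩
    rw [List.drop_take, List.drop_drop] at hj
    have h2 := List.prefix_take_iff.mp hj
    by_cases ht : t = []
    · subst ht
      exact ⟨i, le_refl _, by omega, by simp⟩
    · have hlen : 0 < t.length := by
        cases t with
        | nil => exact absurd rfl ht
        | cons a l => simp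
      refine ⟨i + j, by omega, ?_, h2.1⟩
      have := h2.2
      omega
  · rintro ⟨q, hiq, hq, hpre⟩
    refine ⟨q - i, ?_⟩
    rw [List.drop_take, List.drop_drop, List.prefix_take_iff]
    have heq : i + (q - i) = q := by omega
    rw [heq]
    exact ⟨hpre, by omega⟩

theorem per_word (s w : String) (L N k : Nat) (hk : k < N) (hN : N ≤ s.toList.length + 1) :
    decide ((lazyNxtGo s w (s.toList.length + L + 1) N 0 (PySem.Str.find s w)).getD k 0
        + w.toList.length ≤ k + L)
      = PySem.Chars.isIn w.toList ((s.toList.drop k).take L) := by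
  have hfind : PySem.Str.find s w = PySem.Str.findFrom s w ((0 : Nat) : Int) none := by
    rw [PySem.Str.findFrom_eq, PySem.Str.find_eq]
    norm_num [PySem.Chars.findFrom_zero]
  have hinv : CurInv s w 0 (PySem.Str.find s w) := by
    rw [hfind]; exact curInv_findFrom s w 0 (by omega)
  have h1 := lazyNxt_getD s w L N 0 k (PySem.Str.find s w) hk (by omega) hinv
  simp only [Nat.zero_add] at h1
  rw [Bool.eq_iff_iff, decide_eq_true_iff, PySem.Chars.isIn_iff_infix, infix_take_drop, h1]

theorem all_congr_mem {α : Type} (l : List α) (f g : α → Bool) (h : ∀ x ∈ l, f x = g x) :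
    l.all f = l.all g := by
  rw [Bool.eq_iff_iff, List.all_eq_true, List.all_eq_true]
  constructor
  · intro H x hx; rw [← h x hx]; exact H x hx
  · intro H x hx; rw [h x hx]; exact H x hx

theorem buildData_eq_some (s : String) (inf N : Nat) (ws : List String)
    (h : ∀ w ∈ ws, w.toList <:+: s.toList) :
    buildData s inf N ws
      = some (ws.map (fun w => (w.toList.length, lazyNxtGo s w inf N 0 (PySem.Str.find s w)))) := by
  induction ws with
  | nil => rfl
  | cons w rest ih =>
    have hne : (PySem.Str.find s w == -1) = false := by
      rw [beq_eq_false_iff_ne, PySem.Str.find_eq, Ne, PySem.Chars.find_eq_neg_one_iff]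
      simpa using h w (by simp)
    simp only [buildData, hne, Bool.false_eq_true, if_false,
      ih (fun x hx => h x (by simp [hx])), List.map_cons]

theorem buildData_eq_none (s : String) (inf N : Nat) (ws : List String)
    (h : ∃ w ∈ ws, ¬ w.toList <:+: s.toList) :
    buildData s inf N ws = none := by
  induction ws with
  | nil => simp at h
  | cons w rest ih =>
    obtain ⟨x, hx, hnx⟩ := h
    simp only [buildData]
    by_cases hw : (PySem.Str.find s w == -1) = true
    · rw [if_pos hw]
    · rcases List.mem_cons.mp hx with rfl | hx'
      · exfalso
        rw [beq_iff_eq, PySem.Str.find_eq, PySem.Chars.find_eq_neg_one_iff] at hw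
        exact hw hnx
      · rw [if_neg hw, ih ⟨x, hx', hnx⟩]

theorem window_infix (u : List Char) (i L : Nat) : (u.drop i).take L <:+: u :=
  ((u.drop i).take_prefix L).isInfix.trans (List.drop_suffix i u).isInfix

set_option maxHeartbeats 1000000 in
theorem main_cons (s w0 : String) (ws : List String) :
    Solution s (w0 :: ws) = Solution_alt s (w0 :: ws) := by
  have hwl : ((((w0 :: ws).length : Nat) : Int) == 0) = false := by simp; omega
  have hwl2 : (((w0 :: ws).length : Nat) == 0) = false := by simp
  have hget : (PySem.List.pyGet? (w0 :: ws) 0).getD "" = w0 := by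
    simp [PySem.List.pyGet?, PySem.List.pyIdx?]
  rw [Solution, Solution_alt]
  simp only [hwl, hwl2, Bool.false_eq_true, if_false, hget, PySem.Str.len_eq, List.headD_cons]
  by_cases hsmall : s.toList.length + 1 ≤ (w0 :: ws).length * w0.toList.length
  · rw [if_pos hsmall, PySem.List.pyRange_one_eq_nil]
    · rfl
    · omega
  · rw [if_neg hsmall]
    have hLle : (w0 :: ws).length * w0.toList.length ≤ s.toList.length := by omega
    have hb : ((s.toList.length : Int) - ((w0 :: ws).length : Int) * (w0.toList.length : Int) + 1)
        = ((s.toList.length + 1 - (w0 :: ws).length * w0.toList.length : Nat) : Int) := by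
      push_cast [Nat.cast_sub (by omega : (w0 :: ws).length * w0.toList.length ≤ s.toList.length + 1)]
      ring
    rw [PySem.List.foldl_append_if_eq_filter, hb, PySem.List.pyRange_one]
    simp only [Int.sub_zero, Int.toNat_natCast, List.nil_append]
    rw [List.filter_map]
    -- the window substring test, rewritten to the list form used on both sides
    have hslice : ∀ k : Nat, ∀ w : String,
        PySem.Str.isIn w (PySem.Str.slice s (some ((0 : Int) + (k : Nat)))
          (some ((0 : Int) + (k : Nat) + ((w0 :: ws).length : Int) * (w0.toList.length : Int))))
        = PySem.Chars.isIn w.toList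
            ((s.toList.drop k).take ((w0 :: ws).length * w0.toList.length)) := by
      intro k w
      rw [Bool.eq_iff_iff, PySem.Str.isIn_iff_infix, PySem.Chars.isIn_iff_infix]
      have heq : (PySem.Str.slice s (some ((0 : Int) + (k : Nat)))
          (some ((0 : Int) + (k : Nat) + ((w0 :: ws).length : Int) * (w0.toList.length : Int)))).toList
          = (s.toList.drop k).take ((w0 :: ws).length * w0.toList.length) := by
        rw [PySem.Str.toList_slice, PySem.Chars.slice_eq_listSlice]
        have h1 : ((0 : Int) + (k : Nat)) = ((k : Nat) : Int) := by ring
        have h2 : (((k : Nat) : Int) + ((w0 :: ws).length : Int) * (w0.toList.length : Int))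
            = ((k : Nat) : Int) + (((w0 :: ws).length * w0.toList.length : Nat) : Int) := by
          push_cast; ring
        rw [h1, h2, PySem.List.slice_natCast_add]
      rw [heq]
    by_cases hall : ∀ w ∈ (w0 :: ws), w.toList <:+: s.toList
    · rw [buildData_eq_some s _ _ _ hall]
      rw [List.filter_congr (q := fun i =>
        (List.map (fun w => (w.toList.length,
            lazyNxtGo s w (s.toList.length + (w0 :: ws).length * w0.toList.length + 1)
              (s.toList.length + 1 - (w0 :: ws).length * w0.toList.length) 0 (PySem.Str.find s w)))
          (w0 :: ws)).all
          (fun d => decide (d.2.getD i 0 + d.1 ≤ i + (w0 :: ws).length * w0.toList.length)))]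
      · simp
      · intro k hk
        have hkN : k < s.toList.length + 1 - (w0 :: ws).length * w0.toList.length := by
          simpa using hk
        simp only [Function.comp]
        rw [List.all_map]
        apply all_congr_mem
        intro w hw
        simp only [Function.comp]
        rw [per_word s w ((w0 :: ws).length * w0.toList.length)
          (s.toList.length + 1 - (w0 :: ws).length * w0.toList.length) k hkN (by omega)]
        exact hslice k w
    · rw [buildData_eq_none s _ _ _ (by push Not at hall; exact hall)]
      push Not at hall
      obtain ⟨x, hx, hnx⟩ := hall
      rw [List.map_eq_nil_iff, List.filter_eq_nil_iff]
      intro k hk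
      simp only [Function.comp, Bool.not_eq_true, List.all_eq_false]
      refine ⟨x, hx, ?_⟩
      rw [hslice k x, PySem.Chars.isIn_eq_false_iff]
      intro hinf
      exact hnx (hinf.trans (window_infix s.toList k _))

-- ===== VERDICT (by name: the statement is the Claim_ definition above) =====
theorem Solution_spec : Claim_equal_Solution := by
  intro s words _hdom
  unfold Spec_Solution
  cases words with
  | nil => rfl
  | cons w0 ws => exact main_cons s w0 ws
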